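-- pv_equiv track=rewrite | github.com/developerashish02/DSA-PYTHON | recursion/subset pattern/removes_a.py | is_starts_with_apple
-- ===== SOURCE A (Python) =====
-- def is_starts_with_apple(string, index, output):
--     # base case
--     if index == len(string):
--         return output
--
--     # recursion call
--     # if substring contains apple skip the word
--     substring = string[index:]
--     if substring.startswith("apple"):
--         return is_starts_with_apple(string, index + 5, output)
--
--     # if apple not contains added to the ans
--     else:
--         output += string[index]
--         return is_starts_with_apple(string, index + 1, output)
-- ===== SOURCE B (Python) =====
-- def is_starts_with_apple(string, index, output):
--     # Remove the non-overlapping "apple" occurrences of the suffix in one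
--     # closed-form step instead of recursing character by character.
--     return output + string[index:].replace("apple", "")
-- ===== Notes on version B (the rewrite author's own statement) =====
-- stated objective: faster
-- what changed: The character-by-character recursion is replaced by a single closed-form expression: output + string[index:].replace("apple", ""), since the greedy left-to-right skip of A is exactly str.replace's non-overlapping removal.
-- outside the precondition, e.g. on is_starts_with_apple('ab', -1, ''): A returns 'bab', B returns 'b'
import Mathlib
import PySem

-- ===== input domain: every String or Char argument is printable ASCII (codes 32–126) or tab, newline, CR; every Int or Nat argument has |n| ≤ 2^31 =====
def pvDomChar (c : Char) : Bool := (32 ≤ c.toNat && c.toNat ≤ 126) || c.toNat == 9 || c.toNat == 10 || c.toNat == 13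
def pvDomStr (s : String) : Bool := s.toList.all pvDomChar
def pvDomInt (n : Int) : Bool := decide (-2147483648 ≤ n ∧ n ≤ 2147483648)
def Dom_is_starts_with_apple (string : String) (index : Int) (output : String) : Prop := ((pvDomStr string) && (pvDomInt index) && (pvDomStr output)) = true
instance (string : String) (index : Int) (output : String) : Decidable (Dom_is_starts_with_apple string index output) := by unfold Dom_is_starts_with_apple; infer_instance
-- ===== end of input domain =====

-- B replaces A's per-character recursion by the closed form output + string[index:].replace("apple", "") (return value only; neither version mutates anything).

-- ===== PORT A =====
-- A's recursion, step for step, on the code-point list (string state kept as List Char per the PySem convention):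
-- base case index == len(string); substring = string[index:]; if it startswith "apple" skip 5; else append string[index], advance 1.
-- Where Python raises IndexError (string[index] out of range) pyGet? is none and the port stops (those inputs are outside Pre_).
def is_starts_with_apple_go (s : List Char) (index : Int) (out : List Char) : List Char :=
  if index = (s.length : Int) then out
  else
    let substring := PySem.List.slice s (some index) none
    if PySem.Chars.startswith substring ("apple".toList) then
      is_starts_with_apple_go s (index + 5) out
    else
      match hg : PySem.List.pyGet? s index with
      | none => out
      | some c => is_starts_with_apple_go s (index + 1) (out ++ [c])
termination_by ((s.length : Int) - index).toNat
decreasing_by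
  · rename_i hne hap
    have hsub : ("apple".toList).length ≤ (PySem.List.slice s (some index) none).length :=
      List.IsPrefix.length_le (List.isPrefixOf_iff_prefix.mp hap)
    have hlt : index < (s.length : Int) := by
      by_contra hge
      rw [Int.not_lt] at hge
      have hz : PySem.List.slice s (some index) none = [] := by
        simp only [PySem.List.slice, PySem.List.clampIdx]
        split_ifs with h1 h2 <;> simp_all <;> omega
      rw [hz] at hsub; simp at hsub
    omega
  · rename_i hnap
    have hlt : index < (s.length : Int) := by
      simp only [PySem.List.pyGet?, PySem.List.pyIdx?] at hg
      split_ifs at hg <;> simp_all <;> omega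
    omega

def is_starts_with_apple (string : String) (index : Int) (output : String) : String :=
  String.ofList (is_starts_with_apple_go string.toList index output.toList)

-- ===== PORT B =====
-- Source B: return output + string[index:].replace("apple", "")
def is_starts_with_apple_alt (string : String) (index : Int) (output : String) : String :=
  String.ofList (output.toList ++
    PySem.Chars.replace (PySem.List.slice string.toList (some index) none) ("apple".toList) [])

-- ===== PRECONDITION & SPEC =====
-- Pre_ excludes index > len(string) and index < -len(string), where Python A raises IndexError
-- (except for rare accidental chains when the whole string starts with "apple"), and negative
-- in-range indices, where Python's negative-index wraparound makes A append the suffix and then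
-- re-scan the WHOLE string — an accident of the slicing no caller of this remove-"apple" routine
-- would specify (e.g. A('ab', -1, '') = 'bab' while B gives 'b').
def Pre_is_starts_with_apple (string : String) (index : Int) (output : String) : Prop :=
  0 ≤ index ∧ index ≤ (string.toList.length : Int)
instance (string : String) (index : Int) (output : String) : Decidable (Pre_is_starts_with_apple string index output) := by unfold Pre_is_starts_with_apple; infer_instance

def pvWitness_is_starts_with_apple : String × Int × String := ("xappleyapple", 0, "q")

def Spec_is_starts_with_apple (string : String) (index : Int) (output : String) (out : String) : Prop := out = is_starts_with_apple_alt string index output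
instance (string : String) (index : Int) (output : String) (out : String) : Decidable (Spec_is_starts_with_apple string index output out) := by unfold Spec_is_starts_with_apple; infer_instance

-- ===== CLAIM (what is proved, stated in full; the proofs are below) =====
def Claim_equal_is_starts_with_apple : Prop := ∀ (string : String) (index : Int) (output : String), Dom_is_starts_with_apple string index output → Pre_is_starts_with_apple string index output → Spec_is_starts_with_apple string index output (is_starts_with_apple string index output)

-- ===== LEMMAS AND PROOFS =====

-- The greedy left-to-right scan that both programs compute, as a direct recursion on the list.
def pvScan : List Char → List Char
  | [] => []
  | c :: t =>
    if ("apple".toList).isPrefixOf (c :: t) then pvScan ((c :: t).drop 5)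
    else c :: pvScan t
termination_by l => l.length
decreasing_by
  · simp
  · simp

lemma pv_go_eq_scan : ∀ (fuel : Nat) (l acc : List Char), l.length ≤ fuel →
    PySem.Chars.replace.go ("apple".toList) [] fuel l acc = acc.reverse ++ pvScan l := by
  intro fuel
  induction fuel with
  | zero =>
    intro l acc h
    have : l = [] := List.eq_nil_of_length_eq_zero (Nat.le_zero.mp h)
    subst this
    simp [PySem.Chars.replace.go, pvScan]
  | succ n ih =>
    intro l acc h
    match l with
    | [] => simp [PySem.Chars.replace.go, pvScan]
    | c :: t =>
      rw [PySem.Chars.replace.go]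
      by_cases hp : ("apple".toList).isPrefixOf (c :: t)
      · rw [if_pos hp]
        have hlen : ((c :: t).drop ("apple".toList).length).length ≤ n := by
          simp at h ⊢; omega
        rw [ih _ _ hlen]
        have hps : pvScan (c :: t) = pvScan ((c :: t).drop 5) := by
          rw [pvScan, if_pos hp]
        simp [hps]
      · rw [if_neg hp]
        have hlen : t.length ≤ n := by simp at h; omega
        rw [ih _ _ hlen]
        rw [pvScan, if_neg hp]
        simp

lemma pv_replace_eq_scan (l : List Char) :
    PySem.Chars.replace l ("apple".toList) [] = pvScan l := by
  rw [PySem.Chars.replace]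
  rw [if_neg (by simp)]
  simpa using pv_go_eq_scan l.length l [] (le_refl _)

lemma pv_goA_eq_scan : ∀ (k : Nat) (s : List Char) (n : Nat), s.length - n = k → n ≤ s.length →
    ∀ (out : List Char), is_starts_with_apple_go s (n : Int) out = out ++ pvScan (s.drop n) := by
  intro k
  induction k using Nat.strong_induction_on with
  | _ k ih =>
  intro s n hk hn out
  by_cases hend : n = s.length
  · subst hend
    rw [is_starts_with_apple_go, if_pos rfl]
    simp [pvScan]
  · have hlt : n < s.length := lt_of_le_of_ne hn hend
    rw [is_starts_with_apple_go, if_neg (by exact_mod_cast hend)]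
    have hslice : PySem.List.slice s (some (n : Int)) none = s.drop n :=
      PySem.List.slice_from_natCast s n
    simp only [hslice]
    by_cases hp : ("apple".toList).isPrefixOf (s.drop n)
    · rw [if_pos (by simpa [PySem.Chars.startswith] using hp)]
      have h5 : n + 5 ≤ s.length := by
        have h1 := List.IsPrefix.length_le (List.isPrefixOf_iff_prefix.mp hp)
        simp at h1; omega
      have hcast : (n : Int) + 5 = ((n + 5 : Nat) : Int) := by push_cast; ring
      rw [hcast, ih (s.length - (n + 5)) (by omega) s (n + 5) rfl h5 out]
      obtain ⟨c, t, hct⟩ : ∃ c t, s.drop n = c :: t := by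
        cases hcase : s.drop n with
        | nil => exfalso; have := List.drop_eq_nil_iff.mp hcase; omega
        | cons c t => exact ⟨c, t, rfl⟩
      have hdrop : (s.drop n).drop 5 = s.drop (n + 5) := by
        rw [List.drop_drop]
      have hsc : pvScan (s.drop n) = pvScan (s.drop (n + 5)) := by
        conv_lhs => rw [hct, pvScan]
        rw [if_pos (hct ▸ hp), ← hct, hdrop]
      rw [hsc]
    · rw [if_neg (by simpa [PySem.Chars.startswith] using hp)]
      have hget : PySem.List.pyGet? s (n : Int) = some s[n] := by
        simp [PySem.List.pyGet?, PySem.List.pyIdx?, hlt]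
      have hcast : (n : Int) + 1 = ((n + 1 : Nat) : Int) := by push_cast; ring
      have hct : s.drop n = s[n] :: s.drop (n + 1) := List.drop_eq_getElem_cons hlt
      split
      · rename_i hnone
        rw [hget] at hnone; cases hnone
      · rename_i c' hsome
        rw [hget] at hsome
        injection hsome with hce
        subst hce
        rw [hcast, ih (s.length - (n + 1)) (by omega) s (n + 1) rfl (by omega) (out ++ [s[n]])]
        rw [hct, pvScan, if_neg (hct ▸ hp)]
        simp


-- ===== VERDICT (by name: the statement is the Claim_ definition above) =====
theorem is_starts_with_apple_spec : Claim_equal_is_starts_with_apple := by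
  intro string index output _ hpre
  obtain ⟨h0, hle⟩ := hpre
  unfold Spec_is_starts_with_apple is_starts_with_apple is_starts_with_apple_alt
  obtain ⟨n, rfl⟩ : ∃ n : Nat, index = (n : Int) := ⟨index.toNat, (Int.toNat_of_nonneg h0).symm⟩
  have hn : n ≤ string.toList.length := by exact_mod_cast hle
  rw [pv_goA_eq_scan (string.toList.length - n) string.toList n rfl hn output.toList,
      PySem.List.slice_from_natCast, pv_replace_eq_scan]
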